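-- pv_equiv track=rewrite | github.com/GlassyFoozle/TrtDnnSplitting | scripts/25_profile_missing_masks.py | _compute_merge_groups
-- ===== SOURCE A (Python) =====
-- def _compute_merge_groups(mask: list) -> list:
--     groups, current = [], [0]
--     for i, bit in enumerate(mask):
--         if bit == 1:
--             groups.append(current)
--             current = [i + 1]
--         else:
--             current.append(i + 1)
--     groups.append(current)
--     return groups
-- ===== SOURCE B (Python) =====
-- def _compute_merge_groups(mask: list) -> list:
--     # Locate cut positions first, then slice the value range into segments.
--     n = len(mask)
--     cuts = [0] + [i + 1 for i, bit in enumerate(mask) if bit == 1] + [n + 1]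
--     return [list(range(cuts[k], cuts[k + 1])) for k in range(len(cuts) - 1)]
-- ===== Notes on version B (the rewrite author's own statement) =====
-- stated objective: alternative
-- what changed: B first collects the cut positions (indices after delimiter bits == 1) and then materialises each group as a contiguous integer range between consecutive cuts, instead of A's single pass that appends element-by-element to a running current group.
import Mathlib
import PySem

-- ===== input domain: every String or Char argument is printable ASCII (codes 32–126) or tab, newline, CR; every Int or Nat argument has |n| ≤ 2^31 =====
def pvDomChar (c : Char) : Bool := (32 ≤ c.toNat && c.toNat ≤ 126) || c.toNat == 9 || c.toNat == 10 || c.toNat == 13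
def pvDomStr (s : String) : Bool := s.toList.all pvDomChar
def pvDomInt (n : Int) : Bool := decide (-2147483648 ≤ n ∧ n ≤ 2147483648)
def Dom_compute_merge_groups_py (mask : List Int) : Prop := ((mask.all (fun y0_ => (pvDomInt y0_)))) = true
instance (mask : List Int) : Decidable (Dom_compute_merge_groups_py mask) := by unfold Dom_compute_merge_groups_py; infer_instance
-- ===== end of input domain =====

-- B locates the cut positions and then slices the value range into segments, instead of A's
-- element-by-element accumulation; same O(n) cost, genuinely different decomposition.

-- ===== PORT A =====
-- one pass over enumerate(mask) with state (groups, current)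
def compute_merge_groups_py (mask : List Int) : List (List Int) :=
  let st := (PySem.List.enumerate mask 0).foldl
    (fun (st : List (List Int) × List Int) p =>
      if p.2 == 1 then (st.1 ++ [st.2], [p.1 + 1]) else (st.1, st.2 ++ [p.1 + 1]))
    ([], [0])
  st.1 ++ [st.2]

-- ===== PORT B =====
-- cuts = [0] + [i+1 for i,bit in enumerate(mask) if bit == 1] + [n+1];
-- groups = [list(range(cuts[k], cuts[k+1])) for k in range(len(cuts)-1)]
def compute_merge_groups_py_alt (mask : List Int) : List (List Int) :=
  let n : Int := mask.length
  let cuts : List Int :=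
    [0] ++ ((PySem.List.enumerate mask 0).filterMap
              (fun p => if p.2 == 1 then some (p.1 + 1) else none)) ++ [n + 1]
  (List.range (cuts.length - 1)).map
    (fun k => PySem.List.pyRange (cuts.getD k 0) (cuts.getD (k + 1) 0) 1)

-- ===== PRECONDITION & SPEC =====
def Spec_compute_merge_groups_py (mask : List Int) (out : List (List Int)) : Prop := out = compute_merge_groups_py_alt mask
instance (mask : List Int) (out : List (List Int)) : Decidable (Spec_compute_merge_groups_py mask out) := by unfold Spec_compute_merge_groups_py; infer_instance

-- ===== CLAIM (what is proved, stated in full; the proofs are below) =====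
def Claim_equal_compute_merge_groups_py : Prop := ∀ (mask : List Int), Dom_compute_merge_groups_py mask → Spec_compute_merge_groups_py mask (compute_merge_groups_py mask)

-- ===== LEMMAS AND PROOFS =====

/-- prepend `x` to the first group -/
def consHead (x : Int) : List (List Int) → List (List Int)
  | [] => [[x]]
  | g :: gs => (x :: g) :: gs

/-- append-prepend `c` to the first group -/
def headApp (c : List Int) : List (List Int) → List (List Int)
  | [] => [c]
  | g :: gs => (c ++ g) :: gs

/-- reference: the groups of values `s+1, s+2, …` cut by the bits of `xs` -/
def Tspec : Int → List Int → List (List Int)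
  | _, [] => [[]]
  | s, bit :: rest =>
    if bit == 1 then [] :: consHead (s + 1) (Tspec (s + 1) rest)
    else consHead (s + 1) (Tspec (s + 1) rest)

/-- reference: the inner cut positions produced from start index `s` -/
def Cspec : Int → List Int → List Int
  | _, [] => []
  | s, bit :: rest => if bit == 1 then (s + 1) :: Cspec (s + 1) rest else Cspec (s + 1) rest

/-- adjacent-pairs map with the range constructor -/
def pairsR : List Int → List (List Int)
  | a :: b :: rest => PySem.List.pyRange a b 1 :: pairsR (b :: rest)
  | _ => []

theorem headApp_singleton (x : Int) (L : List (List Int)) : headApp [x] L = consHead x L := by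
  cases L <;> simp [headApp, consHead]

theorem A_loop (xs : List Int) : ∀ (s : Int) (groups : List (List Int)) (current : List Int),
    (let st := (PySem.List.enumerate xs s).foldl
        (fun (st : List (List Int) × List Int) p =>
          if p.2 == 1 then (st.1 ++ [st.2], [p.1 + 1]) else (st.1, st.2 ++ [p.1 + 1]))
        (groups, current)
     st.1 ++ [st.2]) = groups ++ headApp current (Tspec s xs) := by
  induction xs with
  | nil => intro s groups current; simp [PySem.List.enumerate_nil, Tspec, headApp]
  | cons bit rest ih =>
    intro s groups current
    simp only [PySem.List.enumerate_cons, List.foldl_cons, Tspec]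
    by_cases h : bit = 1
    · simp only [h, beq_self_eq_true, if_pos]
      rw [ih (s + 1) (groups ++ [current]) [s + 1]]
      simp [List.append_assoc]
      cases Tspec (s + 1) rest <;> simp [headApp, consHead]
    · have hb : (bit == 1) = false := by simp [h]
      simp only [hb, if_neg, Bool.false_eq_true, not_false_iff]
      rw [ih (s + 1) groups (current ++ [s + 1])]
      cases Tspec (s + 1) rest <;> simp [headApp, consHead]

theorem filterMap_cuts (xs : List Int) : ∀ (s : Int),
    (PySem.List.enumerate xs s).filterMap
      (fun p => if p.2 == 1 then some (p.1 + 1) else none) = Cspec s xs := by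
  induction xs with
  | nil => intro s; simp [PySem.List.enumerate_nil, Cspec]
  | cons bit rest ih =>
    intro s
    simp only [PySem.List.enumerate_cons, List.filterMap_cons, Cspec]
    by_cases h : bit = 1
    · simp only [h]
      simpa using ih (s + 1)
    · have hb : (bit == 1) = false := by simp [h]
      simp only [hb]
      simpa using ih (s + 1)

theorem range_map_pairs (L : List Int) :
    (List.range (L.length - 1)).map
      (fun k => PySem.List.pyRange (L.getD k 0) (L.getD (k + 1) 0) 1) = pairsR L := by
  induction L with
  | nil => simp [pairsR]
  | cons a M ih =>
    cases M with
    | nil => simp [pairsR]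
    | cons b rest =>
      have hlen : (a :: b :: rest).length - 1 = rest.length + 1 := by simp
      rw [hlen, List.range_succ_eq_map, List.map_cons, List.map_map]
      simp only [pairsR]
      congr 1

theorem Cspec_lb (xs : List Int) : ∀ (s x : Int), x ∈ Cspec s xs → s + 1 ≤ x := by
  induction xs with
  | nil => intro s x h; simp [Cspec] at h
  | cons bit rest ih =>
    intro s x h
    simp only [Cspec] at h
    by_cases hb : bit = 1
    · simp [hb] at h
      rcases h with h | h
      · omega
      · have := ih (s + 1) x h; omega
    · have hbf : (bit == 1) = false := by simp [hb]
      rw [hbf] at h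
      simp at h
      have := ih (s + 1) x h; omega

theorem pairsR_cons_lt (s h : Int) (M : List Int) (hs : s < h) :
    pairsR (s :: h :: M) = consHead s (pairsR ((s + 1) :: h :: M)) := by
  simp only [pairsR]
  rw [PySem.List.pyRange_one_cons hs]
  simp [consHead]

theorem pairs_main (xs : List Int) : ∀ (s e : Int), e = s + xs.length + 1 →
    pairsR (s :: (Cspec s xs ++ [e])) = headApp [s] (Tspec s xs) := by
  induction xs with
  | nil =>
    intro s e he
    have : e = s + 1 := by simp at he; omega
    subst this
    simp [Cspec, pairsR, Tspec, headApp, PySem.List.pyRange_one_singleton]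
  | cons bit rest ih =>
    intro s e he
    have he' : e = (s + 1) + (rest.length : Int) + 1 := by
      simp only [List.length_cons] at he; push_cast at he ⊢; omega
    simp only [Cspec, Tspec]
    by_cases hb : bit = 1
    · simp only [hb, beq_self_eq_true, if_pos, List.cons_append]
      simp only [pairsR]
      rw [ih (s + 1) e he', PySem.List.pyRange_one_singleton]
      simp only [headApp_singleton]
      cases Tspec (s + 1) rest <;> simp [consHead]
    · have hbf : (bit == 1) = false := by simp [hb]
      rw [hbf]
      simp only [Bool.false_eq_true, if_neg, not_false_iff]
      obtain ⟨h, M', hM'⟩ : ∃ h M', Cspec (s + 1) rest ++ [e] = h :: M' := by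
        cases Cspec (s + 1) rest with
        | nil => exact ⟨_, _, rfl⟩
        | cons c cs => exact ⟨c, cs ++ _, rfl⟩
      have hsh : s + 1 ≤ h := by
        have hh : h ∈ Cspec (s + 1) rest ++ [e] := by
          rw [hM']; exact List.mem_cons_self
        rcases List.mem_append.mp hh with hc | hee
        · have := Cspec_lb rest (s + 1) h hc; omega
        · simp at hee; omega
      rw [hM', pairsR_cons_lt s h M' (by omega), ← hM', ih (s + 1) e he']
      simp only [headApp_singleton]

-- ===== VERDICT (by name: the statement is the Claim_ definition above) =====
theorem compute_merge_groups_py_spec : Claim_equal_compute_merge_groups_py := by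
  intro mask _
  unfold Spec_compute_merge_groups_py compute_merge_groups_py compute_merge_groups_py_alt
  simp only []
  rw [A_loop mask 0 [] [0], filterMap_cuts mask 0, range_map_pairs]
  have hp := pairs_main mask 0 ((mask.length : Int) + 1) (by omega)
  simp only [List.singleton_append, List.nil_append]
  rw [List.cons_append, hp]
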